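-- pv_equiv track=rewrite | github.com/KaramAlrasam/New_projects | duplicate_letters.py | duplicate_letters1
-- ===== SOURCE A (Python) =====
-- from collections import Counter
--
-- def duplicate_letters1(str1:str):
-- #use split function to make list of words
--   m_list=str1.split(" ")
-- # use for loop with condition to discove which word has duplicate letter
--   for item in m_list:
--     dic=Counter(item)
--     for l in dic:
--       if dic[l]>1:
--         return False
-- # use del to drain the content of Counter
--     # dic={}
--   return True
-- ===== SOURCE B (Python) =====
-- def duplicate_letters1(str1: str):
--     for word in str1.split(" "):
--         s = sorted(word)
--         for a, b in zip(s, s[1:]):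
--             if a == b:
--                 return False
--     return True
-- ===== Notes on version B (the rewrite author's own statement) =====
-- stated objective: alternative
-- what changed: Replaces the per-word Counter hash plus an inner key scan for counts > 1 with sort-then-adjacent-scan: sort each word's letters and report a duplicate iff two equal letters become neighbours.
import Mathlib
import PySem

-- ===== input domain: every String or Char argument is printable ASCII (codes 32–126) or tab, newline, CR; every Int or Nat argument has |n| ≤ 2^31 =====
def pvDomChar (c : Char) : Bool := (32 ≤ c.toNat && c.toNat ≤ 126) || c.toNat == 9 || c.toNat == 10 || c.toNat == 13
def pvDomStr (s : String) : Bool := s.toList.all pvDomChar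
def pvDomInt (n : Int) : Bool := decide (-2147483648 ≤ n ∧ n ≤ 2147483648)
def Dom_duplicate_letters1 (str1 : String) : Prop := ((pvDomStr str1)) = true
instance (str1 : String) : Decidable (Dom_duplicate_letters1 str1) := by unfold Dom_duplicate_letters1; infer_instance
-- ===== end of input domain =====

-- B replaces A's per-word Counter + inner key scan with sort-then-adjacent-scan (alternative algorithm; not claimed faster).


-- ===== PORT A =====
-- inner 'for l in dic: if dic[l] > 1: return False' (early return = stop at first hit)
def dlA_inner (dic : PySem.Dict Char Int) : List Char → Bool
  | [] => true
  | l :: ls => if dic.getD l 0 > 1 then false else dlA_inner dic ls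

-- outer 'for item in m_list: dic = Counter(item); …'
def dlA_outer : List String → Bool
  | [] => true
  | item :: rest =>
      let dic := PySem.Dict.counter item.toList
      if dlA_inner dic dic.keys then dlA_outer rest else false

def duplicate_letters1 (str1 : String) : Bool :=
  dlA_outer ((PySem.Str.split? str1 " ").getD [])   -- sep " " ≠ "" so split? is always some

-- ===== PORT B =====
-- 'for a, b in zip(s, s[1:]): if a == b: return False' — scan adjacent pairs of the sorted word
def dlB_scan : List Char → Bool
  | a :: b :: t => if a == b then false else dlB_scan (b :: t)
  | _ => true

def dlB_outer : List String → Bool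
  | [] => true
  | word :: rest =>
      if dlB_scan (PySem.List.sorted word.toList (fun x => x) false) then dlB_outer rest else false

def duplicate_letters1_alt (str1 : String) : Bool :=
  dlB_outer ((PySem.Str.split? str1 " ").getD [])

-- ===== PRECONDITION & SPEC =====
def Spec_duplicate_letters1 (str1 : String) (out : Bool) : Prop := out = duplicate_letters1_alt str1
instance (str1 : String) (out : Bool) : Decidable (Spec_duplicate_letters1 str1 out) := by unfold Spec_duplicate_letters1; infer_instance

-- ===== CLAIM =====
def Claim_equal_duplicate_letters1 : Prop := ∀ (str1 : String), Dom_duplicate_letters1 str1 → Spec_duplicate_letters1 str1 (duplicate_letters1 str1)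

-- ===== LEMMAS AND PROOFS =====

theorem dlA_inner_eq_all (dic : PySem.Dict Char Int) (ks : List Char) :
    dlA_inner dic ks = ks.all (fun l => !decide (dic.getD l 0 > 1)) := by
  induction ks with
  | nil => rfl
  | cons l ls ih =>
      simp only [dlA_inner, List.all_cons, ih]
      split_ifs with h <;> simp [h]

-- A's key scan of the word's Counter succeeds iff the word has no duplicate letters
theorem aWord_eq_nodup (w : String) :
    dlA_inner (PySem.Dict.counter w.toList) (PySem.Dict.counter w.toList).keys =
    decide w.toList.Nodup := by
  rw [dlA_inner_eq_all, PySem.Dict.keys_counter]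
  simp only [PySem.Dict.getD_counter]
  rw [Bool.eq_iff_iff]
  simp only [List.all_eq_true, Bool.not_eq_eq_eq_not, Bool.not_true, decide_eq_false_iff_not,
    not_lt, decide_eq_true_eq]
  rw [List.nodup_iff_count_le_one]
  constructor
  · intro h a
    by_cases ha : a ∈ w.toList
    · have := h a ((PySem.Set.mem_ofList _ _).2 ha)
      exact_mod_cast this
    · simp [List.count_eq_zero_of_not_mem ha]
  · intro h l _
    exact_mod_cast h l

theorem dlB_scan_iff_chain (xs : List Char) :
    dlB_scan xs = true ↔ xs.IsChain (· ≠ ·) := by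
  induction xs with
  | nil => simp [dlB_scan]
  | cons a t ih =>
      cases t with
      | nil => simp [dlB_scan]
      | cons b s =>
          simp only [dlB_scan, List.isChain_cons_cons]
          split_ifs with h
          · simp [beq_iff_eq.mp h]
          · rw [ih]
            have hab : a ≠ b := fun hab => h (beq_iff_eq.mpr hab)
            tauto

-- B's adjacent scan of the sorted word succeeds iff the word has no duplicate letters
theorem bWord_eq_nodup (w : String) :
    dlB_scan (PySem.List.sorted w.toList (fun x => x) false) = decide w.toList.Nodup := by
  rw [Bool.eq_iff_iff, dlB_scan_iff_chain, decide_eq_true_eq]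
  have hperm : (PySem.List.sorted w.toList (fun x => x) false).Perm w.toList :=
    PySem.List.sorted_perm _ _ _
  have hle : (PySem.List.sorted w.toList (fun x => x) false).Pairwise (· ≤ ·) :=
    PySem.List.sorted_pairwise _ _
  constructor
  · intro hne
    have hlt : (PySem.List.sorted w.toList (fun x => x) false).IsChain (· < ·) := by
      rw [List.isChain_iff_getElem]
      intro i hi
      exact lt_of_le_of_ne ((List.isChain_iff_pairwise.mpr hle).getElem i hi) (hne.getElem i hi)
    have hp : (PySem.List.sorted w.toList (fun x => x) false).Pairwise (· < ·) :=
      List.isChain_iff_pairwise.mp hlt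
    exact hperm.nodup_iff.mp (hp.imp (fun h => ne_of_lt h))
  · intro hnd
    have hp : (PySem.List.sorted w.toList (fun x => x) false).Pairwise (· ≠ ·) :=
      hperm.nodup_iff.mpr hnd
    rw [List.isChain_iff_getElem]
    intro i hi
    exact (List.pairwise_iff_getElem.mp hp) i (i+1) (by omega) hi (Nat.lt_succ_self i)

-- ===== VERDICT =====
theorem duplicate_letters1_spec : Claim_equal_duplicate_letters1 := by
  intro str1 _
  unfold Spec_duplicate_letters1 duplicate_letters1 duplicate_letters1_alt
  generalize (PySem.Str.split? str1 " ").getD [] = ws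
  induction ws with
  | nil => rfl
  | cons w rest ih =>
      simp only [dlA_outer, dlB_outer]
      rw [aWord_eq_nodup w, bWord_eq_nodup w]
      split_ifs with h <;> simp_all
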